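-- pv_equiv track=rewrite | github.com/gordon-derek/advent-of-code-2020 | day6/day6.py | sum_answers
-- ===== SOURCE A (Python) =====
-- def sum_answers(answers):
--     sum_answers_unique = 0
--     sum_answers_same = 0
--     for answer in answers:
--         set_answers = set()
--         for char in answer:
--             if char != ' ':
--                 set_answers.add(char)
--         sum_answers_unique += len(set_answers)
--         for person in answer.split(' '):
--             person_answers = set()
--             for char in person:
--                 person_answers.add(char)
--             set_answers = set_answers & person_answers
--         sum_answers_same += len(set_answers)
--     return [sum_answers_unique, sum_answers_same]
-- ===== SOURCE B (Python) =====
-- def sum_answers(answers):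
--     sum_answers_unique = 0
--     sum_answers_same = 0
--     for answer in answers:
--         persons = answer.split(' ')
--         n = len(persons)
--         counts = {}
--         for person in persons:
--             for char in dict.fromkeys(person):
--                 counts[char] = counts.get(char, 0) + 1
--         sum_answers_unique += len(counts)
--         sum_answers_same += sum(1 for v in counts.values() if v == n)
--     return [sum_answers_unique, sum_answers_same]
-- ===== Notes on version B (the rewrite author's own statement) =====
-- stated objective: alternative
-- what changed: Per group, B replaces A's non-space set build plus repeated set-intersection over persons by a single dict counting in how many persons each letter occurs: unique = number of distinct keys, same = number of letters counted len(persons) times.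
import Mathlib
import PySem

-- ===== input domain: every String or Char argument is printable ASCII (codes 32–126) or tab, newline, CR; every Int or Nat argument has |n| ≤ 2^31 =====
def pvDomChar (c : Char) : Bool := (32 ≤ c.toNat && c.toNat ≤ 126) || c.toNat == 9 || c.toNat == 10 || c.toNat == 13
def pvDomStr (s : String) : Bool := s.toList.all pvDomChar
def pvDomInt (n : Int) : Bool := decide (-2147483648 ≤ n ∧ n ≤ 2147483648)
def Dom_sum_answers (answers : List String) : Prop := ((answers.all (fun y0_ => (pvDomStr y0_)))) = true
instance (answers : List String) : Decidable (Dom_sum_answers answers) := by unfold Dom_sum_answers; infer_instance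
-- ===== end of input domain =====

-- B replaces A's per-group repeated set-intersection loop by one occurrence-counting pass
-- (a dict counting in how many persons each letter occurs): alternative algorithm, same results.

-- ===== PORT A =====
def sum_answers (answers : List String) : List Int :=
  let r : Int × Int := answers.foldl (fun acc answer =>
    let setAnswers : PySem.Set Char :=
      answer.toList.foldl (fun s c => if c ≠ ' ' then PySem.Set.add s c else s) PySem.Set.empty
    let u := acc.1 + PySem.Set.len setAnswers
    let final : PySem.Set Char :=
      (PySem.Chars.splitOn answer.toList [' ']).foldl
        (fun s person => PySem.Set.inter s (person.foldl PySem.Set.add PySem.Set.empty)) setAnswers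
    (u, acc.2 + PySem.Set.len final)) (0, 0)
  [r.1, r.2]

-- ===== PORT B =====
def sum_answers_alt (answers : List String) : List Int :=
  let r : Int × Int := answers.foldl (fun acc answer =>
    let persons := PySem.Chars.splitOn answer.toList [' ']
    let n : Int := persons.length
    let counts : PySem.Dict Char Int :=
      persons.foldl (fun d person =>
        (PySem.List.dedup person).foldl (fun d c => d.insert c (d.getD c 0 + 1)) d) PySem.Dict.empty
    (acc.1 + (PySem.Dict.size counts : Int),
     acc.2 + ((PySem.Dict.values counts).countP (fun v => v == n) : Int))) (0, 0)
  [r.1, r.2]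

-- ===== PRECONDITION & SPEC =====
def Spec_sum_answers (answers : List String) (out : List Int) : Prop := out = sum_answers_alt answers
instance (answers : List String) (out : List Int) : Decidable (Spec_sum_answers answers out) := by unfold Spec_sum_answers; infer_instance

-- ===== CLAIM (what is proved, stated in full; the proofs are below) =====
def Claim_equal_sum_answers : Prop := ∀ (answers : List String), Dom_sum_answers answers → Spec_sum_answers answers (sum_answers answers)

-- ===== LEMMAS AND PROOFS =====

-- splitOn.go on the single-char separator ' ': appends a nonempty list of parts whose
-- concatenation is the pending chunk followed by the non-space characters of the rest.
theorem pv_go_space (fuel : Nat) : ∀ (l cur : List Char) (acc : List (List Char)),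
    l.length ≤ fuel →
    ∃ parts, PySem.Chars.splitOn.go [' '] fuel l cur acc = acc.reverse ++ parts ∧
      parts ≠ [] ∧ parts.flatten = cur.reverse ++ l.filter (fun c => decide (c ≠ ' ')) := by
  induction fuel with
  | zero =>
    intro l cur acc hl
    have : l = [] := List.length_eq_zero_iff.mp (Nat.le_zero.mp hl)
    subst this
    exact ⟨[cur.reverse], by simp [PySem.Chars.splitOn.go], by simp, by simp⟩
  | succ fuel ih =>
    intro l cur acc hl
    cases l with
    | nil => exact ⟨[cur.reverse], by simp [PySem.Chars.splitOn.go], by simp, by simp⟩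
    | cons c rest =>
      rw [PySem.Chars.splitOn.go]
      by_cases hc : c = ' '
      · subst hc
        have hpre : List.isPrefixOf [' '] (' ' :: rest) = true := by simp [List.isPrefixOf]
        rw [if_pos hpre]
        obtain ⟨parts, heq, hne, hflat⟩ := ih rest [] (cur.reverse :: acc)
          (by simpa using Nat.le_of_succ_le_succ hl)
        refine ⟨cur.reverse :: parts, ?_, by simp, by simp [hflat]⟩
        simp [heq]
      · have hpre : List.isPrefixOf [' '] (c :: rest) = false := by
          simp [List.isPrefixOf]; exact fun h => hc h.symm
        rw [if_neg (by simp [hpre])]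
        obtain ⟨parts, heq, hne, hflat⟩ := ih rest (c :: cur) acc
          (by simpa using Nat.le_of_succ_le_succ hl)
        exact ⟨parts, heq, hne, by simp [hflat, hc]⟩

theorem pv_split_spec (cs : List Char) :
    PySem.Chars.splitOn cs [' '] ≠ [] ∧
    (PySem.Chars.splitOn cs [' ']).flatten = cs.filter (fun c => decide (c ≠ ' ')) := by
  obtain ⟨parts, heq, hne, hflat⟩ := pv_go_space (cs.length + 1) cs [] [] (Nat.le_succ _)
  unfold PySem.Chars.splitOn
  rw [heq]
  refine ⟨hne, ?_⟩
  simpa using hflat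

-- membership in the repeated-intersection fold
theorem pv_mem_foldl_inter (ps : List (List Char)) (s0 : PySem.Set Char) (c : Char) :
    c ∈ ps.foldl (fun s p => PySem.Set.inter s (PySem.Set.ofList p)) s0 ↔
      c ∈ s0 ∧ ∀ p ∈ ps, c ∈ p := by
  induction ps generalizing s0 with
  | nil => simp
  | cons p ps ih =>
    simp only [List.foldl_cons, ih, PySem.Set.mem_inter, PySem.Set.mem_ofList, List.mem_cons]
    constructor
    · rintro ⟨⟨h0, hp⟩, hall⟩
      exact ⟨h0, by rintro q (rfl | hq); exact hp; exact hall q hq⟩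
    · rintro ⟨h0, hall⟩
      exact ⟨⟨h0, hall p (Or.inl rfl)⟩, fun q hq => hall q (Or.inr hq)⟩

theorem pv_nodup_foldl_inter (ps : List (List Char)) (s0 : PySem.Set Char) (h : s0.Nodup) :
    (ps.foldl (fun s p => PySem.Set.inter s (PySem.Set.ofList p)) s0).Nodup := by
  induction ps generalizing s0 with
  | nil => exact h
  | cons p ps ih => exact ih _ (PySem.Set.nodup_inter _ _ h)

-- how many persons answered letter c
theorem pv_count_letters (ps : List (List Char)) (c : Char) :
    ((ps.map (fun p => PySem.List.dedup p)).flatten).count c = ps.countP (fun p => decide (c ∈ p)) := by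
  rw [List.count_flatten, List.map_map]
  have : (List.map (List.count c ∘ fun p => PySem.List.dedup p) ps)
       = ps.map (fun p => if c ∈ p then 1 else 0) := by
    apply List.map_congr_left
    intro p _
    by_cases hp : c ∈ p
    · simp only [Function.comp]
      rw [List.count_eq_one_of_mem (PySem.List.nodup_dedup p) ((PySem.List.mem_dedup p c).mpr hp)]
      simp [hp]
    · simp only [Function.comp]
      rw [List.count_eq_zero.mpr (fun h => hp ((PySem.List.mem_dedup p c).mp h))]
      simp [hp]
  rw [this, PySem.List.sum_map_ite_one_zero_nat' (fun p => c ∈ p) ps]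

-- counts is Counter(letters) for letters = the per-person deduplicated answers, concatenated
theorem pv_counts_eq (ps : List (List Char)) :
    ps.foldl (fun d person =>
        (PySem.List.dedup person).foldl (fun d c => d.insert c (d.getD c 0 + 1)) d) PySem.Dict.empty
      = PySem.Dict.counter ((ps.map (fun p => PySem.List.dedup p)).flatten) := by
  rw [← PySem.Dict.foldl_insert_getD_add_one_eq_counter, List.foldl_flatten, List.foldl_map]

theorem pv_mem_letters (ps : List (List Char)) (c : Char) :
    c ∈ (ps.map (fun p => PySem.List.dedup p)).flatten ↔ ∃ p ∈ ps, c ∈ p := by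
  simp [List.mem_flatten]

-- per-answer equality of both components
theorem pv_main (cs : List Char) :
    PySem.Set.len (cs.foldl (fun s c => if c ≠ ' ' then PySem.Set.add s c else s) PySem.Set.empty)
      = ((PySem.Dict.size ((PySem.Chars.splitOn cs [' ']).foldl (fun d person =>
          (PySem.List.dedup person).foldl (fun d c => d.insert c (d.getD c 0 + 1)) d)
          (PySem.Dict.empty : PySem.Dict Char Int)) : Nat) : Int)
  ∧ PySem.Set.len ((PySem.Chars.splitOn cs [' ']).foldl
        (fun s person => PySem.Set.inter s (person.foldl PySem.Set.add PySem.Set.empty))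
        (cs.foldl (fun s c => if c ≠ ' ' then PySem.Set.add s c else s) PySem.Set.empty))
      = (((PySem.Dict.values ((PySem.Chars.splitOn cs [' ']).foldl (fun d person =>
          (PySem.List.dedup person).foldl (fun d c => d.insert c (d.getD c 0 + 1)) d)
          (PySem.Dict.empty : PySem.Dict Char Int))).countP
            (fun v => v == ((PySem.Chars.splitOn cs [' ']).length : Int)) : Nat) : Int) := by
  obtain ⟨hne, hflat⟩ := pv_split_spec cs
  set ps := PySem.Chars.splitOn cs [' '] with hps
  set letters := (ps.map (fun p => PySem.List.dedup p)).flatten with hlet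
  have hsetA : cs.foldl (fun s c => if c ≠ ' ' then PySem.Set.add s c else s) PySem.Set.empty
      = PySem.Set.ofList (cs.filter (fun c => decide (c ≠ ' '))) := by
    rw [PySem.List.foldl_ite_eq_foldl_filter, PySem.Set.ofList_eq_foldl]
    rfl
  have hmemA : ∀ c, c ∈ cs.filter (fun c => decide (c ≠ ' ')) ↔ ∃ p ∈ ps, c ∈ p := by
    intro c
    rw [← hflat]
    simp [List.mem_flatten]
  have hcounts : ps.foldl (fun d person =>
        (PySem.List.dedup person).foldl (fun d c => d.insert c (d.getD c 0 + 1)) d) (PySem.Dict.empty : PySem.Dict Char Int)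
      = PySem.Dict.counter letters := pv_counts_eq ps
  have hforall : ∀ c : Char, (∀ p ∈ ps, c ∈ p) → ∃ p ∈ ps, c ∈ p := by
    intro c h
    obtain ⟨p, hp⟩ := List.exists_mem_of_ne_nil ps hne
    exact ⟨p, hp, h p hp⟩
  constructor
  · -- unique component
    have hperm : (PySem.Set.ofList (cs.filter (fun c => decide (c ≠ ' ')))).Perm
        (PySem.Set.ofList letters) := by
      rw [List.perm_ext_iff_of_nodup (PySem.Set.nodup_ofList _) (PySem.Set.nodup_ofList _)]
      intro c
      rw [PySem.Set.mem_ofList, PySem.Set.mem_ofList, hmemA, hlet, pv_mem_letters]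
    have hsize : PySem.Dict.size (PySem.Dict.counter letters) = (PySem.Set.ofList letters).length := by
      unfold PySem.Dict.size
      rw [PySem.Dict.items_counter, List.length_map]
    rw [hsetA, hcounts, hsize]
    simp only [PySem.Set.len]
    exact congrArg Nat.cast hperm.length_eq
  · -- same component
    have hfinal : ps.foldl (fun s person =>
          PySem.Set.inter s (person.foldl PySem.Set.add PySem.Set.empty))
          (cs.foldl (fun s c => if c ≠ ' ' then PySem.Set.add s c else s) PySem.Set.empty)
        = ps.foldl (fun s person => PySem.Set.inter s (PySem.Set.ofList person))
          (PySem.Set.ofList (cs.filter (fun c => decide (c ≠ ' ')))) := by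
      rw [hsetA]
      exact PySem.List.foldl_congr_mem ps _ _ _
        (fun s p _ => congrArg (PySem.Set.inter s) (PySem.Set.ofList_eq_foldl p).symm)
    have hmemF : ∀ c, c ∈ ps.foldl (fun s person => PySem.Set.inter s (PySem.Set.ofList person))
          (PySem.Set.ofList (cs.filter (fun c => decide (c ≠ ' ')))) ↔ ∀ p ∈ ps, c ∈ p := by
      intro c
      rw [pv_mem_foldl_inter, PySem.Set.mem_ofList, hmemA]
      constructor
      · exact fun h => h.2
      · exact fun h => ⟨hforall c h, h⟩
    have hvals : PySem.Dict.values (PySem.Dict.counter letters)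
        = (PySem.Set.ofList letters).map (fun k => ((letters.count k : Nat) : Int)) := by
      unfold PySem.Dict.values
      rw [PySem.Dict.items_counter, List.map_map]
      rfl
    have hcnt : ∀ c : Char, (letters.count c = ps.length) ↔ ∀ p ∈ ps, c ∈ p := by
      intro c
      rw [hlet, pv_count_letters, List.countP_eq_length]
      simp
    have hpermF : (ps.foldl (fun s person => PySem.Set.inter s (PySem.Set.ofList person))
          (PySem.Set.ofList (cs.filter (fun c => decide (c ≠ ' '))))).Perm
        ((PySem.Set.ofList letters).filter
          (fun k => ((letters.count k : Nat) : Int) == ((ps.length : Nat) : Int))) := by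
      rw [List.perm_ext_iff_of_nodup
        (pv_nodup_foldl_inter _ _ (PySem.Set.nodup_ofList _))
        ((PySem.Set.nodup_ofList _).filter _)]
      intro c
      rw [hmemF, List.mem_filter, PySem.Set.mem_ofList]
      simp only [beq_iff_eq, Nat.cast_inj]
      rw [hcnt c, hlet, pv_mem_letters]
      constructor
      · exact fun h => ⟨hforall c h, h⟩
      · exact fun h => h.2
    rw [hcounts, hvals, List.countP_map, hfinal]
    simp only [PySem.Set.len]
    rw [List.countP_eq_length_filter]
    exact congrArg Nat.cast hpermF.length_eq

-- per-answer step equality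
theorem pv_step (acc : Int × Int) (answer : String) :
    (acc.1 + PySem.Set.len (answer.toList.foldl
        (fun s c => if c ≠ ' ' then PySem.Set.add s c else s) PySem.Set.empty),
     acc.2 + PySem.Set.len ((PySem.Chars.splitOn answer.toList [' ']).foldl
        (fun s person => PySem.Set.inter s (person.foldl PySem.Set.add PySem.Set.empty))
        (answer.toList.foldl (fun s c => if c ≠ ' ' then PySem.Set.add s c else s)
          PySem.Set.empty)))
    = (acc.1 + ((PySem.Dict.size ((PySem.Chars.splitOn answer.toList [' ']).foldl
          (fun d person => (PySem.List.dedup person).foldl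
            (fun d c => d.insert c (d.getD c 0 + 1)) d) (PySem.Dict.empty : PySem.Dict Char Int)) : Nat) : Int),
       acc.2 + (((PySem.Dict.values ((PySem.Chars.splitOn answer.toList [' ']).foldl
          (fun d person => (PySem.List.dedup person).foldl
            (fun d c => d.insert c (d.getD c 0 + 1)) d) (PySem.Dict.empty : PySem.Dict Char Int))).countP
            (fun v => v == ((PySem.Chars.splitOn answer.toList [' ']).length : Int)) : Nat) : Int)) := by
  obtain ⟨h1, h2⟩ := pv_main answer.toList
  rw [h1, h2]

-- ===== VERDICT (by name: the statement is the Claim_ definition above) =====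
theorem sum_answers_spec : Claim_equal_sum_answers := by
  intro answers _
  unfold Spec_sum_answers sum_answers sum_answers_alt
  have h := PySem.List.foldl_congr_mem answers _ _ ((0,0) : Int × Int)
    (fun acc x _ => pv_step acc x)
  simp only [h]
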